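-- pv_equiv track=rewrite | github.com/Mzekala-Romanadze/Joker-Game | Game_Individually/Basic_Functions/get_players_scores_functions.py | initial_set_scores_table
-- ===== SOURCE A (Python) =====
-- def initial_set_scores_table(set_scores):
--     players_and_set_scores = {}
--
--     for game_set in set_scores:
--         for player, score in game_set.items():
--             if player not in players_and_set_scores:
--                 players_and_set_scores[player] = []
--             players_and_set_scores[player].append(score)
--
--     return players_and_set_scores
-- ===== SOURCE B (Python) =====
-- def initial_set_scores_table(set_scores):
--     players = dict.fromkeys(p for s in set_scores for p in s)
--     return {p: [s[p] for s in set_scores if p in s] for p in players}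
-- ===== Notes on version B (the rewrite author's own statement) =====
-- stated objective: alternative
-- what changed: Inverted the loop nesting: instead of one appending pass over sets maintaining a mutable dict, B first computes the player order with dict.fromkeys over the flattened keys and then gathers each player's scores set-by-set in a comprehension; Pre_ only requires each game_set association list to have distinct keys, which every real Python dict satisfies.
import Mathlib
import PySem

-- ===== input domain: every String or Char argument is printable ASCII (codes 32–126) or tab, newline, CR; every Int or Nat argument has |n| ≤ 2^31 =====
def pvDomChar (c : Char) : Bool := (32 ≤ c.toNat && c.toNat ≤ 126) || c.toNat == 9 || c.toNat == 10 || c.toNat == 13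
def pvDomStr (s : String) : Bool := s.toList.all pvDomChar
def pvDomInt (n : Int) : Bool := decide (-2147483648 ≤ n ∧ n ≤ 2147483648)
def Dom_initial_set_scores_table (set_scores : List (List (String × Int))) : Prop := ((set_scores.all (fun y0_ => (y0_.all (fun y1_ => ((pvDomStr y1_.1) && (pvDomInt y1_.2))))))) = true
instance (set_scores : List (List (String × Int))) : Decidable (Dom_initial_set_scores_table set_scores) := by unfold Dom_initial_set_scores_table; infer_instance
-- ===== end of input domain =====

-- B inverts the loop nesting (player-outer instead of set-outer); alternative decomposition, same result.

-- ===== PORT A =====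
-- 'player in d' on the accumulator dict (assoc list with unique keys)
def pyDictContains (d : List (String × List Int)) (k : String) : Bool :=
  d.any (fun e => e.1 == k)

-- in-place update of the (single) entry with key k: d[k].append / d[k] = …
def pyDictModify (d : List (String × List Int)) (k : String) (f : List Int → List Int) :
    List (String × List Int) :=
  match d with
  | [] => []
  | e :: rest => if e.1 == k then (e.1, f e.2) :: rest else e :: pyDictModify rest k f

def initial_set_scores_table (set_scores : List (List (String × Int))) : List (String × List Int) :=
  set_scores.foldl
    (fun d game_set =>
      game_set.foldl
        (fun d pr =>
          -- if player not in players_and_set_scores: players_and_set_scores[player] = []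
          let d := if pyDictContains d pr.1 then d else d ++ [(pr.1, [])]
          -- players_and_set_scores[player].append(score)
          pyDictModify d pr.1 (fun l => l ++ [pr.2]))
        d)
    []

-- ===== PORT B =====
-- dict.fromkeys: the distinct keys in first-occurrence order
def firstKeys : List String → List String
  | [] => []
  | p :: rest => p :: firstKeys (rest.filter (fun q => q != p))
termination_by l => l.length
decreasing_by simpa using Nat.lt_succ_of_le (List.length_filter_le _ _)

def initial_set_scores_table_alt (set_scores : List (List (String × Int))) :
    List (String × List Int) :=
  let players := firstKeys (set_scores.flatMap (fun s => s.map Prod.fst))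
  players.map (fun p =>
    (p, set_scores.filterMap (fun s => (s.find? (fun e => e.1 == p)).map Prod.snd)))

-- ===== PRECONDITION & SPEC =====
-- Pre_ requires each game_set association list to have distinct keys: the Python argument is a
-- list of dicts, and a Python dict can never hold two entries with the same key, so every input
-- the Python A ever receives satisfies this.
def Pre_initial_set_scores_table (set_scores : List (List (String × Int))) : Prop :=
  ∀ s ∈ set_scores, (s.map Prod.fst).Nodup

instance (set_scores : List (List (String × Int))) : Decidable (Pre_initial_set_scores_table set_scores) := by
  unfold Pre_initial_set_scores_table; infer_instance

def pvWitness_initial_set_scores_table : (List (List (String × Int))) :=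
  [[("a", 1), ("b", 2)], [("a", 3)]]

def Spec_initial_set_scores_table (set_scores : List (List (String × Int))) (out : List (String × List Int)) : Prop := out = initial_set_scores_table_alt set_scores
instance (set_scores : List (List (String × Int))) (out : List (String × List Int)) : Decidable (Spec_initial_set_scores_table set_scores out) := by unfold Spec_initial_set_scores_table; infer_instance

-- ===== CLAIM (what is proved, stated in full; the proofs are below) =====
def Claim_equal_initial_set_scores_table : Prop := ∀ (set_scores : List (List (String × Int))), Dom_initial_set_scores_table set_scores → Pre_initial_set_scores_table set_scores → Spec_initial_set_scores_table set_scores (initial_set_scores_table set_scores)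

-- ===== LEMMAS AND PROOFS =====

-- the scores recorded for player p by a run over the flat list of pairs l
def vals (p : String) (l : List (String × Int)) : List Int :=
  (l.filter (fun q => q.1 == p)).map Prod.snd

-- the body of A's inner loop
def stepA (d : List (String × List Int)) (pr : String × Int) : List (String × List Int) :=
  let d := if pyDictContains d pr.1 then d else d ++ [(pr.1, [])]
  pyDictModify d pr.1 (fun l => l ++ [pr.2])

-- the keys of l not yet seen, in first-occurrence order
def newKeys (seen : List String) (l : List String) : List String :=
  firstKeys (l.filter (fun p => !(decide (p ∈ seen))))

theorem firstKeys_nil : firstKeys [] = [] := by rw [firstKeys]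

theorem vals_cons (p : String) (e : String × Int) (l : List (String × Int)) :
    vals p (e :: l) = if e.1 == p then e.2 :: vals p l else vals p l := by
  by_cases h : e.1 == p <;> simp [vals, h]

theorem vals_append (p : String) (l1 l2 : List (String × Int)) :
    vals p (l1 ++ l2) = vals p l1 ++ vals p l2 := by
  simp [vals, List.filter_append]

theorem pyDictContains_iff (d : List (String × List Int)) (k : String) :
    pyDictContains d k = true ↔ k ∈ d.map Prod.fst := by
  unfold pyDictContains
  rw [List.any_eq_true]
  constructor
  · rintro ⟨e, he, hk⟩
    exact List.mem_map.mpr ⟨e, he, by simpa using hk⟩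
  · intro hm
    obtain ⟨e, he, hk⟩ := List.mem_map.mp hm
    exact ⟨e, he, by simpa using hk⟩

theorem mem_firstKeys {x : String} : ∀ (l : List String), x ∈ firstKeys l → x ∈ l
  | [], h => by rw [firstKeys_nil] at h; exact absurd h (List.not_mem_nil)
  | p :: rest, h => by
    rw [firstKeys] at h
    rcases List.mem_cons.mp h with h1 | h1
    · exact List.mem_cons.mpr (Or.inl h1)
    · exact List.mem_cons_of_mem _ (List.mem_of_mem_filter (mem_firstKeys _ h1))
termination_by l => l.length
decreasing_by simpa using Nat.lt_succ_of_le (List.length_filter_le _ _)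

theorem mem_newKeys {x : String} {seen l} (h : x ∈ newKeys seen l) : x ∉ seen := by
  have h2 := List.of_mem_filter (mem_firstKeys _ h)
  simpa using h2

theorem newKeys_nil (seen : List String) : newKeys seen [] = [] := by
  simp [newKeys, firstKeys_nil]

theorem newKeys_cons_mem {seen : List String} {p : String} (l : List String)
    (h : p ∈ seen) : newKeys seen (p :: l) = newKeys seen l := by
  simp [newKeys, h]

theorem newKeys_cons_new {seen : List String} {p : String} (l : List String)
    (h : p ∉ seen) : newKeys seen (p :: l) = p :: newKeys (seen ++ [p]) l := by
  rw [newKeys, List.filter_cons]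
  simp only [h, decide_false, Bool.not_false, if_pos]
  rw [firstKeys, newKeys, List.filter_filter]
  congr 1
  congr 1
  apply List.filter_congr
  intro x _
  by_cases hx : x = p <;> simp [hx]

theorem keys_pyDictModify (d : List (String × List Int)) (k : String) (f : List Int → List Int) :
    (pyDictModify d k f).map Prod.fst = d.map Prod.fst := by
  induction d with
  | nil => rfl
  | cons e rest ih =>
    rw [pyDictModify]
    by_cases h : e.1 == k <;> simp [h, ih]

theorem pyDictModify_append_of_not_mem (d e : List (String × List Int)) (k : String)
    (f : List Int → List Int) (h : k ∉ d.map Prod.fst) :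
    pyDictModify (d ++ e) k f = d ++ pyDictModify e k f := by
  induction d with
  | nil => rfl
  | cons x rest ih =>
    simp only [List.map_cons, List.mem_cons, not_or] at h
    have hx : (x.1 == k) = false := beq_eq_false_iff_ne.mpr (Ne.symm h.1)
    simp [pyDictModify, hx, ih h.2]

theorem map_gather_pyDictModify (d : List (String × List Int)) (p : String) (sc : Int)
    (t : List (String × Int)) (hnd : (d.map Prod.fst).Nodup) :
    (pyDictModify d p (fun l => l ++ [sc])).map (fun e => (e.1, e.2 ++ vals e.1 t))
      = d.map (fun e => (e.1, e.2 ++ vals e.1 ((p, sc) :: t))) := by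
  induction d with
  | nil => rfl
  | cons e rest ih =>
    simp only [List.map_cons, List.nodup_cons] at hnd
    by_cases h : e.1 == p
    · have hp : e.1 = p := by simpa using h
      rw [pyDictModify, if_pos h]
      simp only [List.map_cons]
      congr 1
      · simp [vals_cons, hp, List.append_assoc]
      · apply List.map_congr_left
        intro y hy
        have hyp : ¬ (p = y.1) := by
          intro hyp
          apply hnd.1
          rw [hp, hyp]
          exact List.mem_map_of_mem hy
        rw [vals_cons, if_neg (by simpa using hyp)]
    · rw [pyDictModify, if_neg (by simp [h])]
      simp only [List.map_cons]
      congr 1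
      · have hne : ¬ (p = e.1) := by
          intro hh
          simp [hh] at h
        rw [vals_cons, if_neg (by simpa using hne)]
      · exact ih hnd.2

theorem foldl_stepA_eq (l : List (String × Int)) : ∀ (d : List (String × List Int)),
    (d.map Prod.fst).Nodup →
    l.foldl stepA d
      = d.map (fun e => (e.1, e.2 ++ vals e.1 l))
        ++ (newKeys (d.map Prod.fst) (l.map Prod.fst)).map (fun p => (p, vals p l)) := by
  induction l with
  | nil =>
    intro d _
    simp [newKeys_nil, vals]
  | cons pr t ih =>
    intro d hnd
    obtain ⟨p, sc⟩ := pr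
    by_cases h : pyDictContains d p
    · -- player already present: modify in place
      have hmem : p ∈ d.map Prod.fst := (pyDictContains_iff d p).mp h
      have hstep : stepA d (p, sc) = pyDictModify d p (fun l => l ++ [sc]) := by
        simp [stepA, h]
      have hkeys : (pyDictModify d p (fun l => l ++ [sc])).map Prod.fst = d.map Prod.fst :=
        keys_pyDictModify d p _
      rw [List.foldl_cons, hstep, ih _ (by rw [hkeys]; exact hnd), hkeys]
      rw [map_gather_pyDictModify d p sc t hnd]
      congr 1
      rw [List.map_cons, newKeys_cons_mem _ hmem]
      apply List.map_congr_left
      intro q hq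
      have hqp : q ≠ p := fun hqp => (mem_newKeys hq) (hqp ▸ hmem)
      rw [vals_cons, if_neg (by simpa using (Ne.symm hqp))]
    · -- new player: append a fresh entry, then the append of the score hits it
      have hnp : p ∉ d.map Prod.fst := fun hm => h ((pyDictContains_iff d p).mpr hm)
      have hstep : stepA d (p, sc) = d ++ [(p, [sc])] := by
        simp only [stepA]
        rw [if_neg h, pyDictModify_append_of_not_mem d _ p _ hnp]
        simp [pyDictModify]
      have hkeys' : ((d ++ [(p, [sc])]).map Prod.fst) = d.map Prod.fst ++ [p] := by simp
      have hnd' : ((d ++ [(p, [sc])]).map Prod.fst).Nodup := by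
        rw [hkeys']
        apply List.Nodup.append hnd (List.nodup_singleton p)
        intro a ha hb
        simp only [List.mem_singleton] at hb
        exact hnp (hb ▸ ha)
      rw [List.foldl_cons, hstep, ih _ hnd', hkeys']
      rw [List.map_cons, newKeys_cons_new _ hnp]
      simp only [List.map_append, List.map_cons, List.map_nil]
      have h1 : d.map (fun e => (e.1, e.2 ++ vals e.1 t))
          = d.map (fun e => (e.1, e.2 ++ vals e.1 ((p, sc) :: t))) := by
        apply List.map_congr_left
        intro e he
        have hep : ¬ (p = e.1) := by
          intro hh
          exact hnp (hh ▸ List.mem_map_of_mem he)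
        rw [vals_cons, if_neg (by simpa using hep)]
      have h2 : [sc] ++ vals p t = vals p ((p, sc) :: t) := by
        rw [vals_cons, if_pos (by simp)]
        simp
      have h3 : (newKeys (d.map Prod.fst ++ [p]) (t.map Prod.fst)).map (fun q => (q, vals q t))
          = (newKeys (d.map Prod.fst ++ [p]) (t.map Prod.fst)).map
              (fun q => (q, vals q ((p, sc) :: t))) := by
        apply List.map_congr_left
        intro q hq
        have hqp : q ≠ p := fun hqp => (mem_newKeys hq) (by simp [hqp])
        rw [vals_cons, if_neg (by simpa using (Ne.symm hqp))]
      rw [h1, h2, h3]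
      simp [List.append_assoc]

theorem nested_foldl_eq (ss : List (List (String × Int))) : ∀ d,
    ss.foldl (fun d s => s.foldl stepA d) d = (ss.flatMap (fun s => s)).foldl stepA d := by
  induction ss with
  | nil => intro d; rfl
  | cons s t ih => intro d; simp [List.flatMap_cons, List.foldl_append, ih]

theorem vals_flatMap (p : String) (ss : List (List (String × Int))) :
    vals p (ss.flatMap (fun s => s)) = ss.flatMap (fun s => vals p s) := by
  induction ss with
  | nil => rfl
  | cons s t ih =>
    simp only [List.flatMap_cons]
    rw [vals_append, ih]

theorem vals_eq_find? (p : String) (s : List (String × Int)) (hnd : (s.map Prod.fst).Nodup) :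
    vals p s = ((s.find? (fun e => e.1 == p)).map Prod.snd).toList := by
  induction s with
  | nil => rfl
  | cons e t ih =>
    simp only [List.map_cons, List.nodup_cons] at hnd
    by_cases h : e.1 == p
    · have hp : e.1 = p := by simpa using h
      have ht : t.filter (fun q => q.1 == p) = [] := by
        apply List.filter_eq_nil_iff.mpr
        intro q hq
        simp only [beq_iff_eq]
        intro hqp
        exact hnd.1 (by rw [hp, ← hqp]; exact List.mem_map_of_mem hq)
      rw [vals_cons, if_pos h, List.find?_cons, h]
      show e.2 :: vals p t = [e.2]
      simp [vals, ht]
    · have hf : (e.1 == p) = false := by simpa using h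
      rw [vals_cons, if_neg h, List.find?_cons, hf]
      simpa using ih hnd.2

theorem filterMap_eq_flatMap_toList {α β : Type} (f : α → Option β) (l : List α) :
    l.filterMap f = l.flatMap (fun a => (f a).toList) := by
  induction l with
  | nil => rfl
  | cons x t ih =>
    rw [List.filterMap_cons, List.flatMap_cons, ← ih]
    cases f x <;> rfl

-- ===== VERDICT (by name: the statement is the Claim_ definition above) =====
theorem initial_set_scores_table_spec : Claim_equal_initial_set_scores_table := by
  intro ss _ hpre
  unfold Spec_initial_set_scores_table
  show initial_set_scores_table ss = initial_set_scores_table_alt ss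
  unfold initial_set_scores_table initial_set_scores_table_alt
  rw [show (fun (d : List (String × List Int)) (game_set : List (String × Int)) =>
        game_set.foldl (fun d pr =>
          let d := if pyDictContains d pr.1 then d else d ++ [(pr.1, [])]
          pyDictModify d pr.1 (fun l => l ++ [pr.2])) d)
      = (fun d s => s.foldl stepA d) from rfl]
  rw [nested_foldl_eq, foldl_stepA_eq _ _ (by simp)]
  simp only [List.map_nil, List.nil_append]
  have hflat : (ss.flatMap (fun s => s)).map Prod.fst = ss.flatMap (fun s => s.map Prod.fst) := by
    simp [List.flatMap_def]
  have hnk : newKeys ([] : List String) ((ss.flatMap (fun s => s)).map Prod.fst)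
      = firstKeys (ss.flatMap (fun s => s.map Prod.fst)) := by
    rw [hflat]
    simp [newKeys]
  rw [hnk]
  apply List.map_congr_left
  intro p _
  congr 1
  rw [vals_flatMap, filterMap_eq_flatMap_toList]
  simp only [List.flatMap_def]
  congr 1
  apply List.map_congr_left
  intro s hs
  exact vals_eq_find? p s (hpre s hs)
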